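-- pv_equiv track=rewrite | github.com/BernaValdivieso/grupo-15-Capstone | planes_empresa_1.py | subclasificacion
-- ===== SOURCE A (Python) =====
-- region_de_puerto = {1: 1,
--                     2: 1,
--                     3: 2,
--                     4: 2,
--                     5: 3,
--                     6: 3,
--                     7: 4,
--                     8: 4
--                     }
--
-- def subclasificacion(combinacion):
--     # SE CREA UN SET DONDE VAN A IR TODOS LOS PUERTOS
--     puertos = set()
--     # SE AGREGAN LOS ELEMENTOS DE LA TUPLA AL SET
--     puertos.update(combinacion)
--     # SE SACA EL 0 SI ES QUE SE ENCUENTRA EN EL SET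
--     puertos.discard(0)
--     # LA IDEA ES TENER EN EL SET TODOS LOS PUERTOS EN LOS QUE SE VA A DESCARGAR
--     # SI SE TIENE (0,0,1,1,1), EL SET ES {1} PORQUE SOLO SE VA AL PUERTO 1
--     # SI SE TIENE (0,0,1,2,3), EL SET ES {1,2,3} Y ASÍ CON TODAS LAS COMBINACIONES
--
--     # SI EL SET TIENE UN ELEMENTO, SIGNIFICA QUE TODOS LOS PUERTOS ESTÁN EN LA MISMA
--     # CLASIFICACIÓN (ES EL MISMO PUERTO), POR LO QUE INDEPENDIENTE DE LA CLASIFICACIÓN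
--     # EN LA QUE ESTÉN, SABEMOS QUE SE LE VA A SUMAR X
--     if len(puertos) == 1:
--         return "X"
--
--     # SI EL SET TIENE MÁS DE UN ELEMENTO, SE DESCARGA EN DISTINTOS PUERTOS Y HAY QUE
--     # REVISAR SI ESTOS ESTÁN EN LA MISMA SUBCLASIFICACIÓN O NO
--     sub_1 = 0
--     sub_2 = 0
--     sub_3 = 0
--     for p in puertos:
--         if region_de_puerto[p] == 1:
--             sub_1 += 1
--         elif region_de_puerto[p] == 2:
--             sub_1 += 1
--         elif region_de_puerto[p] == 3:
--             sub_2 += 1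
--         elif region_de_puerto[p] == 4:
--             sub_3 += 1
--     # CASO EN QUE TODOS LOS PUERTOS ESTÁN EN SUBCLASIFICACIÓN 1
--     if (sub_1 != 0) and (sub_2 == 0) and (sub_3 == 0):
--         return "X"
--     # CASO EN QUE TODOS LOS PUERTOS ESTÁN EN SUBCLASIFICACIÓN 2
--     if (sub_1 == 0) and (sub_2 != 0) and (sub_3 == 0):
--         return "X"
--     # CASO EN QUE TODOS LOS PUERTOS ESTÁN EN SUBCLASIFICACIÓN 3
--     if (sub_1 == 0) and (sub_2 == 0) and (sub_3 != 0):
--         return "X"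
--     # CUALQUIER OTRO CASO SE ADICIONA Y
--     return "Y"
-- ===== SOURCE B (Python) =====
-- region_de_puerto = {1: 1,
--                     2: 1,
--                     3: 2,
--                     4: 2,
--                     5: 3,
--                     6: 3,
--                     7: 4,
--                     8: 4
--                     }
--
-- def subclasificacion(combinacion):
--     # Single scan of the raw list tracking the min and max nonzero port; no set,
--     # no dict lookup, no counters.  Correct because the three super-classifications
--     # are contiguous port ranges (1-4, 5-6, 7-8), so all ports share one class
--     # iff the extreme ports do.
--     lo = hi = None
--     for p in combinacion:
--         if p != 0:
--             if lo is None: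
--                 lo = hi = p
--             else:
--                 if p < lo:
--                     lo = p
--                 if p > hi:
--                     hi = p
--     if lo is None:
--         return "Y"
--     if lo == hi:
--         return "X"
--     return "X" if hi <= 4 or (5 <= lo and hi <= 6) or 7 <= lo else "Y"
-- ===== Notes on version B (the rewrite author's own statement) =====
-- stated objective: simpler
-- what changed: Replaces A's set-building, dict lookups and three counters by one scan of the raw list tracking the min and max nonzero port, then a constant interval test (exploiting that the three super-classifications are the contiguous ranges 1-4, 5-6, 7-8).
import Mathlib
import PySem

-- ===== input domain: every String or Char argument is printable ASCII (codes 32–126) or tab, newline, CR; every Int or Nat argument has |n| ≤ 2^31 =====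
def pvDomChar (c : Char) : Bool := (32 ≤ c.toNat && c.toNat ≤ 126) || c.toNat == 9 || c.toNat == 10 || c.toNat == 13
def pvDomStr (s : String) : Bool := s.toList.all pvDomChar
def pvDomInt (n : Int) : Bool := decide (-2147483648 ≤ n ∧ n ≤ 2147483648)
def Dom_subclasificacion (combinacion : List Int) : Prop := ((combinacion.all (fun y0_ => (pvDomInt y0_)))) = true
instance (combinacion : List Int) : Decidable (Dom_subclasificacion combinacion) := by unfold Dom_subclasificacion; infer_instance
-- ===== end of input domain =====

-- B replaces A's set + dict lookups + three counters by one min/max scan of the raw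
-- list and a constant interval test (the super-classes are contiguous ranges); simpler, same cost.


-- ===== PORT A =====
-- module constant region_de_puerto (shared context of A and B's source module)
def regionDePuerto : PySem.Dict Int Int :=
  PySem.Dict.ofList [(1,1),(2,1),(3,2),(4,2),(5,3),(6,3),(7,4),(8,4)]

-- Python raises KeyError on region_de_puerto[p] for p outside 1..8; getD _ 0 is used
-- (0 matches no branch) and Pre_ excludes exactly those inputs.
def subclasificacion (combinacion : List Int) : String :=
  let puertos : PySem.Set Int := PySem.Set.update PySem.Set.empty combinacion
  let puertos := PySem.Set.discard puertos 0
  if puertos.length = 1 then "X"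
  else
    let s := puertos.foldl (fun (acc : Int × Int × Int) p =>
      if PySem.Dict.getD regionDePuerto p 0 = 1 then (acc.1 + 1, acc.2.1, acc.2.2)
      else if PySem.Dict.getD regionDePuerto p 0 = 2 then (acc.1 + 1, acc.2.1, acc.2.2)
      else if PySem.Dict.getD regionDePuerto p 0 = 3 then (acc.1, acc.2.1 + 1, acc.2.2)
      else if PySem.Dict.getD regionDePuerto p 0 = 4 then (acc.1, acc.2.1, acc.2.2 + 1)
      else acc) (0, 0, 0)
    if s.1 ≠ 0 ∧ s.2.1 = 0 ∧ s.2.2 = 0 then "X"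
    else if s.1 = 0 ∧ s.2.1 ≠ 0 ∧ s.2.2 = 0 then "X"
    else if s.1 = 0 ∧ s.2.1 = 0 ∧ s.2.2 ≠ 0 then "X"
    else "Y"

-- ===== PORT B =====
-- the loop body of Source B: lo/hi = None is the 'none' accumulator
def pvStep (acc : Option (Int × Int)) (p : Int) : Option (Int × Int) :=
  if p ≠ 0 then
    match acc with
    | none => some (p, p)
    | some (lo, hi) => some (if p < lo then p else lo, if hi < p then p else hi)
  else acc

def subclasificacion_alt (combinacion : List Int) : String :=
  match combinacion.foldl pvStep none with
  | none => "Y"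
  | some (lo, hi) =>
    if lo = hi then "X"
    else if hi ≤ 4 ∨ (5 ≤ lo ∧ hi ≤ 6) ∨ 7 ≤ lo then "X" else "Y"

-- ===== PRECONDITION & SPEC =====
-- Pre_ excludes exactly the inputs where Python A raises KeyError: more than one
-- distinct nonzero port while some nonzero element is outside the dict keys 1..8.
def Pre_subclasificacion (combinacion : List Int) : Prop :=
  (PySem.Set.discard (PySem.Set.ofList combinacion) 0).length = 1 ∨
  ∀ x ∈ combinacion, x = 0 ∨ (1 ≤ x ∧ x ≤ 8)
instance (combinacion : List Int) : Decidable (Pre_subclasificacion combinacion) := by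
  unfold Pre_subclasificacion; infer_instance
def pvWitness_subclasificacion : List Int := [1, 3, 0]

def Spec_subclasificacion (combinacion : List Int) (out : String) : Prop := out = subclasificacion_alt combinacion
instance (combinacion : List Int) (out : String) : Decidable (Spec_subclasificacion combinacion out) := by unfold Spec_subclasificacion; infer_instance

-- ===== CLAIM (what is proved, stated in full; the proofs are below) =====
def Claim_equal_subclasificacion : Prop := ∀ (combinacion : List Int), Dom_subclasificacion combinacion → Pre_subclasificacion combinacion → Spec_subclasificacion combinacion (subclasificacion combinacion)

-- ===== LEMMAS AND PROOFS =====

-- region lookup, abbreviated for the proofs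
def pvF (p : Int) : Int := PySem.Dict.getD regionDePuerto p 0

-- for ports 1..8: region 1/2 ⟺ port ≤ 4, region 3 ⟺ port ∈ 5..6, region 4 ⟺ port ≥ 7
theorem pvF_iff (p : Int) (h1 : 1 ≤ p) (h8 : p ≤ 8) :
    ((pvF p = 1 ∨ pvF p = 2) ↔ p ≤ 4) ∧ (pvF p = 3 ↔ (5 ≤ p ∧ p ≤ 6)) ∧ (pvF p = 4 ↔ 7 ≤ p) := by
  interval_cases p <;> simp [pvF, regionDePuerto, PySem.Dict.getD] <;> decide

-- A's fold computes the three class counts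
theorem foldA_eq (ps : List Int) (a b c : Int) :
    ps.foldl (fun (acc : Int × Int × Int) p =>
      if PySem.Dict.getD regionDePuerto p 0 = 1 then (acc.1 + 1, acc.2.1, acc.2.2)
      else if PySem.Dict.getD regionDePuerto p 0 = 2 then (acc.1 + 1, acc.2.1, acc.2.2)
      else if PySem.Dict.getD regionDePuerto p 0 = 3 then (acc.1, acc.2.1 + 1, acc.2.2)
      else if PySem.Dict.getD regionDePuerto p 0 = 4 then (acc.1, acc.2.1, acc.2.2 + 1)
      else acc) (a, b, c) =
    (a + ((ps.filter (fun p => pvF p = 1 ∨ pvF p = 2)).length : Int),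
     b + ((ps.filter (fun p => pvF p = 3)).length : Int),
     c + ((ps.filter (fun p => pvF p = 4)).length : Int)) := by
  induction ps generalizing a b c with
  | nil => simp
  | cons p ps ih =>
    simp only [List.foldl_cons, List.filter_cons]
    by_cases h1 : pvF p = 1 <;> by_cases h2 : pvF p = 2 <;>
      by_cases h3 : pvF p = 3 <;> by_cases h4 : pvF p = 4 <;>
      simp only [pvF] at h1 h2 h3 h4 <;>
      simp [h1, h2, h3, h4, ih, pvF] <;> ring

-- B's fold ignores zeros
theorem foldB_filter (l : List Int) (acc : Option (Int × Int)) :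
    l.foldl pvStep acc = (l.filter (fun p => p ≠ 0)).foldl pvStep acc := by
  induction l generalizing acc with
  | nil => rfl
  | cons p l ih =>
    by_cases hp : p = 0 <;> simp [hp, ih, pvStep]

-- the min/max fold over nonzero elements
theorem mm_spec (xs : List Int) (a b : Int) (hab : a ≤ b) :
    ∃ lo hi, xs.foldl pvStep (some (a, b)) = some (lo, hi) ∧
      (lo = a ∨ lo ∈ xs) ∧ (hi = b ∨ hi ∈ xs) ∧ lo ≤ a ∧ b ≤ hi ∧
      (∀ p ∈ xs, p ≠ 0 → lo ≤ p ∧ p ≤ hi) := by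
  induction xs generalizing a b with
  | nil => exact ⟨a, b, rfl, Or.inl rfl, Or.inl rfl, le_refl _, le_refl _, by simp⟩
  | cons p xs ih =>
    by_cases hp : p = 0
    · obtain ⟨lo, hi, heq, hlo, hhi, hla, hb, hall⟩ := ih a b hab
      refine ⟨lo, hi, ?_, ?_, ?_, hla, hb, ?_⟩
      · simpa [pvStep, hp] using heq
      · rcases hlo with h | h; exact Or.inl h; exact Or.inr (List.mem_cons_of_mem _ h)
      · rcases hhi with h | h; exact Or.inl h; exact Or.inr (List.mem_cons_of_mem _ h)
      · intro q hq hq0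
        rcases List.mem_cons.mp hq with h | h
        · subst h; exact absurd hp hq0
        · exact hall q h hq0
    · have hstep : pvStep (some (a, b)) p =
          some (if p < a then p else a, if b < p then p else b) := by
        simp [pvStep, hp]
      obtain ⟨lo, hi, heq, hlo, hhi, hla, hb, hall⟩ :=
        ih (if p < a then p else a) (if b < p then p else b) (by split_ifs <;> omega)
      refine ⟨lo, hi, by rw [List.foldl_cons, hstep]; exact heq, ?_, ?_, ?_, ?_, ?_⟩
      · rcases hlo with h | h
        · by_cases hpa : p < a
          · exact Or.inr (by simp [h, hpa])
          · exact Or.inl (by simp [hpa] at h; exact h)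
        · exact Or.inr (List.mem_cons_of_mem _ h)
      · rcases hhi with h | h
        · by_cases hbp : b < p
          · exact Or.inr (by simp [h, hbp])
          · exact Or.inl (by simp [hbp] at h; exact h)
        · exact Or.inr (List.mem_cons_of_mem _ h)
      · split_ifs at hla <;> omega
      · split_ifs at hb <;> omega
      · intro q hq _
        rcases List.mem_cons.mp hq with h | h
        · subst h
          constructor
          · have := hla; split_ifs at this <;> omega
          · have := hb; split_ifs at this <;> omega
        · exact hall q h ‹_›

-- a counter is nonzero as soon as one element of ps satisfies its class predicate
theorem filter_len_ne_zero {P : Int → Prop} [DecidablePred P] (ps : List Int) (p : Int)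
    (hp : p ∈ ps) (hP : P p) : ((ps.filter (fun q => P q)).length : Int) ≠ 0 := by
  have : p ∈ ps.filter (fun q => P q) := List.mem_filter.mpr ⟨hp, by simpa using hP⟩
  have := List.length_pos_of_mem this
  omega

-- a counter is zero iff no element of ps satisfies its class predicate
theorem filter_len_eq_zero {P : Int → Prop} [DecidablePred P] (ps : List Int)
    (h : ∀ p ∈ ps, ¬ P p) : ((ps.filter (fun q => P q)).length : Int) = 0 := by
  have : ps.filter (fun q => P q) = [] := List.filter_eq_nil_iff.mpr (by simpa using h)
  simp [this]

-- ===== VERDICT (by name: the statement is the Claim_ definition above) =====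
theorem subclasificacion_spec : Claim_equal_subclasificacion := by
  intro combinacion _ hpre
  unfold Spec_subclasificacion subclasificacion subclasificacion_alt
  simp only []
  set ps : List Int := PySem.Set.discard (PySem.Set.ofList combinacion) 0 with hps
  have hA : PySem.Set.discard (PySem.Set.update PySem.Set.empty combinacion) 0 = ps := rfl
  rw [hA, foldB_filter]
  have hmemps : ∀ p, p ∈ ps ↔ p ∈ combinacion ∧ p ≠ 0 := by
    intro p
    rw [hps, PySem.Set.mem_discard, PySem.Set.mem_ofList]
  have hnd : ps.Nodup := PySem.Set.nodup_discard _ _ (PySem.Set.nodup_ofList _)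
  set nz : List Int := combinacion.filter (fun p => p ≠ 0) with hnz
  have hmemnz : ∀ p, p ∈ nz ↔ p ∈ combinacion ∧ p ≠ 0 := by
    intro p; rw [hnz, List.mem_filter]; simp
  match hcase : nz with
  | [] =>
    have hempty : ps = [] := by
      refine List.eq_nil_iff_forall_not_mem.mpr fun p hp => ?_
      exact absurd ((hmemnz p).mpr ((hmemps p).mp hp)) (List.not_mem_nil)
    rw [hempty]
    norm_num [foldA_eq]
  | x :: xs =>
    have hx0 : x ≠ 0 := ((hmemnz x).mp List.mem_cons_self).2
    obtain ⟨lo, hi, heq, hlo, hhi, hla, hb, hall⟩ := mm_spec xs x x (le_refl x)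
    have hfold : (x :: xs).foldl pvStep none = some (lo, hi) := by
      have hstep : pvStep none x = some (x, x) := by simp [pvStep, hx0]
      rw [List.foldl_cons, hstep]; exact heq
    rw [hfold]
    show _ = if lo = hi then "X"
             else if hi ≤ 4 ∨ (5 ≤ lo ∧ hi ≤ 6) ∨ 7 ≤ lo then "X" else "Y"
    have hmem' : ∀ p, p ∈ ps ↔ p ∈ x :: xs := fun p => (hmemps p).trans (hmemnz p).symm
    have hlops : lo ∈ ps := by
      rw [hmem']
      rcases hlo with h | h
      · simp [h]
      · exact List.mem_cons_of_mem _ h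
    have hhips : hi ∈ ps := by
      rw [hmem']
      rcases hhi with h | h
      · simp [h]
      · exact List.mem_cons_of_mem _ h
    have hallps : ∀ p ∈ ps, lo ≤ p ∧ p ≤ hi := by
      intro p hp
      rcases List.mem_cons.mp ((hmem' p).mp hp) with h | h
      · subst h; exact ⟨hla, hb⟩
      · exact hall p h ((hmemnz p).mp (List.mem_cons_of_mem _ h)).2
    by_cases hlohi : lo = hi
    · -- all nonzero ports equal: ps has exactly one element, both return "X"
      have hlen1 : ps.length = 1 := by
        obtain ⟨a, l, hal⟩ := List.exists_cons_of_ne_nil (List.ne_nil_of_mem hlops)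
        have ha : a = lo := by
          have := hallps a (hal ▸ List.mem_cons_self); omega
        have hl : l = [] := by
          refine List.eq_nil_iff_forall_not_mem.mpr fun b hb => ?_
          have hbps : b ∈ ps := hal ▸ List.mem_cons_of_mem _ hb
          have hb' : b = lo := by have := hallps b hbps; omega
          have hnd' : (a :: l).Nodup := hal ▸ hnd
          exact absurd (show a ∈ l by rw [ha, ← hb']; exact hb) (List.nodup_cons.mp hnd').1
        rw [hal, hl]; rfl
      simp [hlen1, hlohi]
    · have hlen : ¬ ps.length = 1 := by
        intro h
        obtain ⟨a, ha⟩ := List.length_eq_one_iff.mp h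
        rw [ha] at hlops hhips
        simp at hlops hhips
        exact hlohi (hlops.trans hhips.symm)
      rw [if_neg hlen, if_neg hlohi]
      have hrange : ∀ p ∈ ps, 1 ≤ p ∧ p ≤ 8 := by
        intro p hp
        rcases hpre with h | h
        · exact absurd h (by rw [← hps]; exact hlen)
        · have := (hmemps p).mp hp
          rcases h p this.1 with h0 | h18
          · exact absurd h0 this.2
          · exact h18
      have hiffs := fun p hp => pvF_iff p (hrange p hp).1 (hrange p hp).2
      rw [foldA_eq]
      simp only [zero_add]
      have hlorange := hrange lo hlops
      have hhirange := hrange hi hhips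
      by_cases hc : hi ≤ 4 ∨ (5 ≤ lo ∧ hi ≤ 6) ∨ 7 ≤ lo
      · rw [if_pos hc]
        rcases hc with h | h | h
        · -- all ports ≤ 4: only class 1 nonempty
          have h1 := filter_len_ne_zero (P := fun p => pvF p = 1 ∨ pvF p = 2) ps lo hlops
            (((hiffs lo hlops).1).mpr (by have := hallps lo hlops; omega))
          have h3 := filter_len_eq_zero (P := fun p => pvF p = 3) ps
            (fun p hp => fun hP => by have := ((hiffs p hp).2.1).mp hP; have := hallps p hp; omega)
          have h4 := filter_len_eq_zero (P := fun p => pvF p = 4) ps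
            (fun p hp => fun hP => by have := ((hiffs p hp).2.2).mp hP; have := hallps p hp; omega)
          split_ifs with hA1 hA2 hA3
          · rfl
          · exact absurd hA2.1 h1
          · exact absurd hA3.1 h1
          · exact absurd ⟨h1, h3, h4⟩ hA1
        · -- all ports in 5..6: only class 2 nonempty
          have h3 := filter_len_ne_zero (P := fun p => pvF p = 3) ps lo hlops
            (((hiffs lo hlops).2.1).mpr (by omega))
          have h1 := filter_len_eq_zero (P := fun p => pvF p = 1 ∨ pvF p = 2) ps
            (fun p hp => fun hP => by have := ((hiffs p hp).1).mp hP; have := hallps p hp; omega)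
          have h4 := filter_len_eq_zero (P := fun p => pvF p = 4) ps
            (fun p hp => fun hP => by have := ((hiffs p hp).2.2).mp hP; have := hallps p hp; omega)
          split_ifs with hA1 hA2 hA3
          · exact absurd hA1.2.1 h3
          · rfl
          · exact absurd hA3.2.1 h3
          · exact absurd ⟨h1, h3, h4⟩ hA2
        · -- all ports ≥ 7: only class 3 nonempty
          have h4 := filter_len_ne_zero (P := fun p => pvF p = 4) ps hi hhips
            (((hiffs hi hhips).2.2).mpr (by have := hallps hi hhips; omega))
          have h1 := filter_len_eq_zero (P := fun p => pvF p = 1 ∨ pvF p = 2) ps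
            (fun p hp => fun hP => by have := ((hiffs p hp).1).mp hP; have := hallps p hp; omega)
          have h3 := filter_len_eq_zero (P := fun p => pvF p = 3) ps
            (fun p hp => fun hP => by have := ((hiffs p hp).2.1).mp hP; have := hallps p hp; omega)
          split_ifs with hA1 hA2 hA3
          · exact absurd hA1.2.2 h4
          · exact absurd hA2.2.2 h4
          · rfl
          · exact absurd ⟨h1, h3, h4⟩ hA3
      · rw [if_neg hc]
        have hc1 : ¬ hi ≤ 4 := fun h => hc (Or.inl h)
        have hc2 : 5 ≤ lo → ¬ hi ≤ 6 := fun h5 h6 => hc (Or.inr (Or.inl ⟨h5, h6⟩))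
        have hc3 : ¬ 7 ≤ lo := fun h => hc (Or.inr (Or.inr h))
        -- hi ≥ 5, lo ≤ 6, and (lo ≤ 4 or hi ≥ 7): two classes are inhabited, A answers "Y"
        by_cases hlo4 : lo ≤ 4
        · have h1 := filter_len_ne_zero (P := fun p => pvF p = 1 ∨ pvF p = 2) ps lo hlops (((hiffs lo hlops).1).mpr hlo4)
          by_cases hhi6 : hi ≤ 6
          · have h3 := filter_len_ne_zero (P := fun p => pvF p = 3) ps hi hhips
              (((hiffs hi hhips).2.1).mpr (by omega))
            split_ifs with hA1 hA2 hA3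
            · exact absurd hA1.2.1 h3
            · exact absurd hA2.1 h1
            · exact absurd hA3.1 h1
            · rfl
          · have h4 := filter_len_ne_zero (P := fun p => pvF p = 4) ps hi hhips
              (((hiffs hi hhips).2.2).mpr (by omega))
            split_ifs with hA1 hA2 hA3
            · exact absurd hA1.2.2 h4
            · exact absurd hA2.1 h1
            · exact absurd hA3.1 h1
            · rfl
        · have hlo5 : 5 ≤ lo := by omega
          have hhi7 : 7 ≤ hi := by have := hc2 hlo5; omega
          have h3 := filter_len_ne_zero (P := fun p => pvF p = 3) ps lo hlops
            (((hiffs lo hlops).2.1).mpr (by omega))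
          have h4 := filter_len_ne_zero (P := fun p => pvF p = 4) ps hi hhips
            (((hiffs hi hhips).2.2).mpr (by omega))
          split_ifs with hA1 hA2 hA3
          · exact absurd hA1.2.1 h3
          · exact absurd hA2.2.2 h4
          · exact absurd hA3.2.1 h3
          · rfl
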